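-- pv_equiv track=rewrite | github.com/TamimH29/Python-Problem-Solutions | hackTeams.py | countTeams
-- ===== SOURCE A (Python) =====
-- def countTeams(t1,t2,p):
--     if(p<t1 and p<t2):
--         return -1
--     if(p-t1 == 0 or p-t2 == 0):
--         return 1
--     else:
--         uset1 = countTeams(t1,t2,p-t1)
--         uset2 = countTeams(t1,t2,p-t2)
--         if(uset1 > 0 and uset2 < 0):
--             return 1+uset1
--         if(uset1 < 0 and uset2 > 0):
--             return 1+uset2
--         if(uset1<0 and uset2<0):
--             return uset2
--         else:
--             return min(1+uset1, 1+uset2)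
-- ===== SOURCE B (Python) =====
-- def countTeams(t1, t2, p):
--     # Bottom-up DP over the remaining value: best[k] = min number of teams
--     # summing to k (or -1 if impossible), computed once for each k in 0..p.
--     if p < t1 and p < t2:
--         return -1
--     best = []
--     for k in range(p + 1):
--         if k == t1 or k == t2:
--             v = 1
--         else:
--             v = -1
--             if k >= t1 and best[k - t1] > 0:
--                 v = best[k - t1] + 1
--             if k >= t2 and best[k - t2] > 0:
--                 w = best[k - t2] + 1
--                 if v < 0 or w < v:
--                     v = w
--         best.append(v)
--     return best[p]
-- ===== Notes on version B (the rewrite author's own statement) =====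
-- stated objective: alternative
-- what changed: Replaces A's branching recursion (exponential on representable p) with a single bottom-up dynamic-programming pass tabulating the answer for every remaining value 0..p; B trades A's exponential worst case for an always-O(p) table build, so it is not uniformly faster on inputs A dismisses quickly.
-- outside the precondition, e.g. on countTeams(-2, 5, 3): A returns 2, B raises IndexError
import Mathlib
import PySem

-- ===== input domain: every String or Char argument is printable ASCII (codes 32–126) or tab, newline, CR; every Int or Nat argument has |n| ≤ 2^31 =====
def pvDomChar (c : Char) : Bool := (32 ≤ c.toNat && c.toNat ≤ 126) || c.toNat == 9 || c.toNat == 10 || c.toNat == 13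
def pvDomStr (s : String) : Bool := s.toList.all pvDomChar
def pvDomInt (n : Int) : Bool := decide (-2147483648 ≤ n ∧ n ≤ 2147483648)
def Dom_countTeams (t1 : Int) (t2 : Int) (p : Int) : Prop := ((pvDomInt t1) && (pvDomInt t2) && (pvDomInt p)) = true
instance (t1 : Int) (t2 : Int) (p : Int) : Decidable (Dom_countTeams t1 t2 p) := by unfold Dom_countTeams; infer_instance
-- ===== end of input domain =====

-- B replaces A's branching recursion by a bottom-up DP table over 0..p (objective: alternative algorithm; exponential worst case traded for an always-O(p) pass).

-- ===== PORT A =====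
-- A's recursion, made total with a fuel parameter generous enough that it is never
-- exhausted on any input where the Python recursion terminates (with positive team
-- sizes p decreases by at least 1 per call, lemma ctFuel_eq below; on terminating
-- runs with other signs every value on a call path is distinct and confined to a
-- band of width about |t1| + |t2| around [t1 - t2, max t2 p]).
def countTeamsFuel (t1 t2 : Int) : Nat → Int → Int
  | 0, _ => -1
  | fuel+1, p =>
    if p < t1 ∧ p < t2 then -1
    else if p - t1 = 0 ∨ p - t2 = 0 then 1
    else
      let uset1 := countTeamsFuel t1 t2 fuel (p - t1)
      let uset2 := countTeamsFuel t1 t2 fuel (p - t2)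
      if uset1 > 0 ∧ uset2 < 0 then 1 + uset1
      else if uset1 < 0 ∧ uset2 > 0 then 1 + uset2
      else if uset1 < 0 ∧ uset2 < 0 then uset2
      else min (1 + uset1) (1 + uset2)

def countTeams (t1 : Int) (t2 : Int) (p : Int) : Int :=
  countTeamsFuel t1 t2 (p.toNat + 2 * (t1.natAbs + t2.natAbs) + 2) p

-- ===== PORT B =====
-- loop body of B's single `for k in range(p+1)` pass
def countTeamsStep (t1 t2 : Int) (best : List Int) (k : Int) : List Int :=
  let v : Int :=
    if k = t1 ∨ k = t2 then 1
    else
      let v : Int := -1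
      let v : Int :=
        if t1 ≤ k ∧ 0 < PySem.List.pyGetD best (k - t1) 0 then
          PySem.List.pyGetD best (k - t1) 0 + 1
        else v
      let v : Int :=
        if t2 ≤ k ∧ 0 < PySem.List.pyGetD best (k - t2) 0 then
          let w := PySem.List.pyGetD best (k - t2) 0 + 1
          if v < 0 ∨ w < v then w else v
        else v
      v
  best ++ [v]

def countTeams_alt (t1 : Int) (t2 : Int) (p : Int) : Int :=
  if p < t1 ∧ p < t2 then -1
  else
    let best := (PySem.List.pyRange 0 (p + 1) 1).foldl (countTeamsStep t1 t2) []
    PySem.List.pyGetD best p 0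

-- ===== PRECONDITION & SPEC =====
-- Pre_ restricts to the task's natural domain of positive team sizes (keeping the
-- trivially impossible region p < t1 ∧ p < t2, where both programs return -1): with a
-- nonpositive team size the Python A recurses without bound (RecursionError) on every
-- remaining input except a few where a subtraction chain happens to hit a team size
-- exactly and A returns a value while B's DP raises IndexError, so those are excluded.
def Pre_countTeams (t1 : Int) (t2 : Int) (p : Int) : Prop :=
  (1 ≤ t1 ∧ 1 ≤ t2) ∨ (p < t1 ∧ p < t2)
instance (t1 : Int) (t2 : Int) (p : Int) : Decidable (Pre_countTeams t1 t2 p) := by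
  unfold Pre_countTeams; infer_instance
def pvWitness_countTeams : Int × Int × Int := (2, 3, 7)

def Spec_countTeams (t1 : Int) (t2 : Int) (p : Int) (out : Int) : Prop := out = countTeams_alt t1 t2 p
instance (t1 : Int) (t2 : Int) (p : Int) (out : Int) : Decidable (Spec_countTeams t1 t2 p out) := by unfold Spec_countTeams; infer_instance

-- ===== CLAIM (what is proved, stated in full; the proofs are below) =====
def Claim_equal_countTeams : Prop := ∀ (t1 : Int) (t2 : Int) (p : Int), Dom_countTeams t1 t2 p → Pre_countTeams t1 t2 p → Spec_countTeams t1 t2 p (countTeams t1 t2 p)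

-- ===== LEMMAS AND PROOFS =====

-- With positive team sizes the result does not depend on the fuel, as long as it exceeds p.toNat.
lemma ctFuel_eq (t1 t2 : Int) (h1 : 1 ≤ t1) (h2 : 1 ≤ t2) :
    ∀ (f g : Nat) (p : Int), p.toNat < f → p.toNat < g →
      countTeamsFuel t1 t2 f p = countTeamsFuel t1 t2 g p := by
  intro f
  induction f with
  | zero => intro g p hf hg; omega
  | succ f ih =>
    intro g p hf hg
    cases g with
    | zero => omega
    | succ g =>
      simp only [countTeamsFuel]
      by_cases hb : p < t1 ∧ p < t2
      · simp [hb]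
      · have hp : t1 ≤ p ∨ t2 ≤ p := by omega
        have hp1 : 1 ≤ p := by omega
        rw [if_neg hb, if_neg hb]
        by_cases h0 : p - t1 = 0 ∨ p - t2 = 0
        · simp [h0]
        · rw [if_neg h0, if_neg h0]
          have e1 : countTeamsFuel t1 t2 f (p - t1) = countTeamsFuel t1 t2 g (p - t1) :=
            ih g (p - t1) (by omega) (by omega)
          have e2 : countTeamsFuel t1 t2 f (p - t2) = countTeamsFuel t1 t2 g (p - t2) :=
            ih g (p - t2) (by omega) (by omega)
          simp only [e1, e2]

-- Whatever the fuel, the impossible-region guard returns -1 at once.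
lemma ctFuel_guard (t1 t2 p : Int) (f : Nat) (hg : p < t1 ∧ p < t2) :
    countTeamsFuel t1 t2 f p = -1 := by
  cases f <;> simp [countTeamsFuel, hg]

-- A's recursion unfolded in terms of countTeams itself.
lemma ct_unfold (t1 t2 p : Int) (h1 : 1 ≤ t1) (h2 : 1 ≤ t2) :
    countTeams t1 t2 p =
      if p < t1 ∧ p < t2 then -1
      else if p - t1 = 0 ∨ p - t2 = 0 then 1
      else
        if countTeams t1 t2 (p - t1) > 0 ∧ countTeams t1 t2 (p - t2) < 0 then
          1 + countTeams t1 t2 (p - t1)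
        else if countTeams t1 t2 (p - t1) < 0 ∧ countTeams t1 t2 (p - t2) > 0 then
          1 + countTeams t1 t2 (p - t2)
        else if countTeams t1 t2 (p - t1) < 0 ∧ countTeams t1 t2 (p - t2) < 0 then
          countTeams t1 t2 (p - t2)
        else min (1 + countTeams t1 t2 (p - t1)) (1 + countTeams t1 t2 (p - t2)) := by
  have hfix : countTeams t1 t2 p = countTeamsFuel t1 t2 (p.toNat + 1) p :=
    ctFuel_eq t1 t2 h1 h2 _ _ p (by omega) (by omega)
  rw [hfix]
  simp only [countTeamsFuel]
  by_cases hb : p < t1 ∧ p < t2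
  · simp [hb]
  · have hp1 : 1 ≤ p := by omega
    rw [if_neg hb, if_neg hb]
    by_cases h0 : p - t1 = 0 ∨ p - t2 = 0
    · simp [h0]
    · rw [if_neg h0, if_neg h0]
      have e1 : countTeamsFuel t1 t2 p.toNat (p - t1) = countTeams t1 t2 (p - t1) :=
        ctFuel_eq t1 t2 h1 h2 _ _ _ (by omega) (by omega)
      have e2 : countTeamsFuel t1 t2 p.toNat (p - t2) = countTeams t1 t2 (p - t2) :=
        ctFuel_eq t1 t2 h1 h2 _ _ _ (by omega) (by omega)
      simp only [e1, e2]

lemma ct_neg (t1 t2 p : Int) (h1 : 1 ≤ t1) (h2 : 1 ≤ t2) (hp : p < 1) :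
    countTeams t1 t2 p = -1 := by
  rw [ct_unfold t1 t2 p h1 h2, if_pos ⟨by omega, by omega⟩]

-- A never returns 0: the result is -1 or at least 1.
lemma ct_sign (t1 t2 : Int) (h1 : 1 ≤ t1) (h2 : 1 ≤ t2) :
    ∀ (n : Nat) (p : Int), p.toNat ≤ n →
      countTeams t1 t2 p = -1 ∨ 1 ≤ countTeams t1 t2 p := by
  intro n
  induction n with
  | zero => intro p hp; left; exact ct_neg t1 t2 p h1 h2 (by omega)
  | succ n ih =>
    intro p hp
    rw [ct_unfold t1 t2 p h1 h2]
    by_cases hb : p < t1 ∧ p < t2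
    · simp [hb]
    · have hp1 : 1 ≤ p := by omega
      rw [if_neg hb]
      by_cases h0 : p - t1 = 0 ∨ p - t2 = 0
      · simp [h0]
      · rw [if_neg h0]
        have s1 := ih (p - t1) (by omega)
        have s2 := ih (p - t2) (by omega)
        split_ifs <;> omega

-- One DP step extends the table of A-values by the A-value at n.
lemma step_spec (t1 t2 : Int) (h1 : 1 ≤ t1) (h2 : 1 ≤ t2) (n : Nat) :
    countTeamsStep t1 t2 ((List.range n).map (fun k : Nat => countTeams t1 t2 (k : Int))) (n : Int)
      = (List.range (n + 1)).map (fun k : Nat => countTeams t1 t2 (k : Int)) := by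
  have hlen : ((List.range n).map (fun k : Nat => countTeams t1 t2 (k : Int))).length = n := by simp
  have hget : ∀ t : Int, 1 ≤ t → t ≤ (n : Int) →
      PySem.List.pyGetD ((List.range n).map (fun k : Nat => countTeams t1 t2 (k : Int))) ((n : Int) - t) 0
        = countTeams t1 t2 ((n : Int) - t) := by
    intro t ht htn
    rw [PySem.List.pyGetD_eq_getElem _ 0 (by omega) (by rw [hlen]; omega)]
    simp only [List.getElem_map, List.getElem_range]
    congr 1
    omega
  rw [countTeamsStep, List.range_succ, List.map_append]
  simp only [List.map_cons, List.map_nil, List.append_cancel_left_eq, List.cons.injEq, and_true]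
  -- remains: B's value v at k = n equals countTeams t1 t2 n
  rw [ct_unfold t1 t2 (n : Int) h1 h2]
  by_cases hbase : (n : Int) = t1 ∨ (n : Int) = t2
  · rw [if_pos hbase, if_neg (show ¬((n : Int) < t1 ∧ (n : Int) < t2) by omega),
        if_pos (show (n : Int) - t1 = 0 ∨ (n : Int) - t2 = 0 by omega)]
  · rw [if_neg hbase]
    by_cases hb : (n : Int) < t1 ∧ (n : Int) < t2
    · rw [if_pos hb, if_neg (fun h => absurd h.1 (by omega : ¬ t2 ≤ (n : Int))),
          if_neg (fun h => absurd h.1 (by omega : ¬ t1 ≤ (n : Int)))]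
    · rw [if_neg hb, if_neg (show ¬((n : Int) - t1 = 0 ∨ (n : Int) - t2 = 0) by omega)]
      have s1 : countTeams t1 t2 ((n : Int) - t1) = -1 ∨ 1 ≤ countTeams t1 t2 ((n : Int) - t1) :=
        ct_sign t1 t2 h1 h2 (((n : Int) - t1).toNat) _ le_rfl
      have s2 : countTeams t1 t2 ((n : Int) - t2) = -1 ∨ 1 ≤ countTeams t1 t2 ((n : Int) - t2) :=
        ct_sign t1 t2 h1 h2 (((n : Int) - t2).toNat) _ le_rfl
      by_cases hk1 : t1 ≤ (n : Int) <;> by_cases hk2 : t2 ≤ (n : Int)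
      · simp only [hget t1 h1 hk1, hget t2 h2 hk2, min_def]
        split_ifs <;> omega
      · have u2neg : countTeams t1 t2 ((n : Int) - t2) = -1 :=
          ct_neg t1 t2 _ h1 h2 (by omega)
        simp only [hget t1 h1 hk1, u2neg, min_def]
        split_ifs <;> omega
      · have u1neg : countTeams t1 t2 ((n : Int) - t1) = -1 :=
          ct_neg t1 t2 _ h1 h2 (by omega)
        simp only [hget t2 h2 hk2, u1neg, min_def]
        split_ifs <;> omega
      · exact absurd ⟨by omega, by omega⟩ hb

-- The whole fold builds the table of A-values for 0..n-1.
lemma fold_spec (t1 t2 : Int) (h1 : 1 ≤ t1) (h2 : 1 ≤ t2) :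
    ∀ (n : Nat),
      (PySem.List.pyRange 0 (n : Int) 1).foldl (countTeamsStep t1 t2) []
        = (List.range n).map (fun k : Nat => countTeams t1 t2 (k : Int)) := by
  intro n
  induction n with
  | zero => simp [PySem.List.pyRange_one_eq_nil]
  | succ n ih =>
    have : ((n + 1 : Nat) : Int) = (n : Int) + 1 := by push_cast; ring
    rw [this, PySem.List.pyRange_one_succ_right (by omega : (0:Int) ≤ (n : Int)), List.foldl_append,
        ih]
    simp only [List.foldl_cons, List.foldl_nil]
    exact step_spec t1 t2 h1 h2 n

-- ===== VERDICT (by name: the statement is the Claim_ definition above) =====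
theorem countTeams_spec : Claim_equal_countTeams := by
  intro t1 t2 p _ hpre
  rcases hpre with ⟨h1, h2⟩ | hg
  case inr =>
    unfold Spec_countTeams countTeams_alt
    rw [if_pos hg, countTeams, ctFuel_guard t1 t2 p _ hg]
  unfold Spec_countTeams countTeams_alt
  by_cases hb : p < t1 ∧ p < t2
  · rw [if_pos hb, ct_unfold t1 t2 p h1 h2, if_pos hb]
  · rw [if_neg hb]
    have hp0 : 0 ≤ p := by omega
    have hcast : p + 1 = ((p.toNat + 1 : Nat) : Int) := by omega
    simp only [hcast, fold_spec t1 t2 h1 h2 (p.toNat + 1)]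
    rw [PySem.List.pyGetD_eq_getElem _ 0 hp0 (by rw [List.length_map, List.length_range]; omega)]
    simp only [List.getElem_map, List.getElem_range]
    congr 1
    omega
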